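-- pv_equiv track=rewrite | github.com/xlsama/chronos-v3 | server/src/ops_agent/tools/tool_permissions.py | _classify_kubernetes
-- ===== SOURCE A (Python) =====
-- from enum import Enum
--
-- class CommandType(str, Enum):
--     READ = "read"           # Read-only, auto-execute
--     WRITE = "write"         # Write operation, needs approval (MEDIUM)
--     DANGEROUS = "dangerous" # High-risk operation, needs approval + red warning (HIGH)
--     BLOCKED = "blocked"     # Absolutely forbidden, reject immediately
--
-- _K8S_READ_SUBCOMMANDS = {
--     "get", "describe", "logs", "top", "explain",
--     "api-resources", "api-versions", "cluster-info",
--     "version", "auth",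
-- }
--
-- _K8S_DANGEROUS_SUBCOMMANDS = {
--     "delete", "drain", "cordon", "taint",
-- }
--
-- _K8S_WRITE_SUBCOMMANDS = {
--     "apply", "create", "patch", "replace", "set",
--     "scale", "autoscale", "rollout",
--     "label", "annotate", "uncordon",
--     "edit", "expose", "run", "cp", "exec",
-- }
--
-- _K8S_BLOCKED_SUBCOMMANDS = {
--     "proxy",
-- }
--
-- def _k8s_get_subcommand(rest: str) -> str | None:
--     """Extract the first non-flag token from the command string after 'kubectl'."""
--     for part in rest.split():
--         if not part.startswith("-"):
--             return part.lower()
--     return None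
--
-- def _classify_kubernetes(command: str) -> CommandType:
--     """Classify a kubectl command."""
--     cmd = command.strip()
--
--     if cmd.startswith("kubectl "):
--         rest = cmd[len("kubectl "):]
--     elif cmd == "kubectl":
--         return CommandType.READ
--     else:
--         return CommandType.WRITE
--
--     subcommand = _k8s_get_subcommand(rest)
--     if subcommand is None:
--         return CommandType.WRITE
--
--     if subcommand in _K8S_BLOCKED_SUBCOMMANDS:
--         return CommandType.BLOCKED
--
--     if subcommand in _K8S_DANGEROUS_SUBCOMMANDS:
--         return CommandType.DANGEROUS
--
--     # rollout: status/history → READ, undo/restart → DANGEROUS, others → WRITE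
--     if subcommand == "rollout":
--         # Find the sub-subcommand after "rollout"
--         found_rollout = False
--         for part in rest.split():
--             if part.startswith("-"):
--                 continue
--             if not found_rollout:
--                 if part.lower() == "rollout":
--                     found_rollout = True
--                 continue
--             sub_sub = part.lower()
--             if sub_sub in ("undo", "restart"):
--                 return CommandType.DANGEROUS
--             if sub_sub in ("status", "history"):
--                 return CommandType.READ
--             return CommandType.WRITE
--         return CommandType.WRITE
--
--     if subcommand in _K8S_READ_SUBCOMMANDS:
--         return CommandType.READ
--
--     if subcommand in _K8S_WRITE_SUBCOMMANDS:
--         return CommandType.WRITE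
--
--     return CommandType.WRITE
-- ===== SOURCE B (Python) =====
-- from enum import Enum
--
-- class CommandType(str, Enum):
--     READ = "read"
--     WRITE = "write"
--     DANGEROUS = "dangerous"
--     BLOCKED = "blocked"
--
-- # Longest-prefix phrase table: the whole classification is data, looked up
-- # on the tuple of the first two non-flag tokens, then the first one.
-- _RULES = {
--     ("proxy",): CommandType.BLOCKED,
--     ("delete",): CommandType.DANGEROUS,
--     ("drain",): CommandType.DANGEROUS,
--     ("cordon",): CommandType.DANGEROUS,
--     ("taint",): CommandType.DANGEROUS,
--     ("rollout", "undo"): CommandType.DANGEROUS,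
--     ("rollout", "restart"): CommandType.DANGEROUS,
--     ("rollout", "status"): CommandType.READ,
--     ("rollout", "history"): CommandType.READ,
--     ("rollout",): CommandType.WRITE,
--     ("get",): CommandType.READ,
--     ("describe",): CommandType.READ,
--     ("logs",): CommandType.READ,
--     ("top",): CommandType.READ,
--     ("explain",): CommandType.READ,
--     ("api-resources",): CommandType.READ,
--     ("api-versions",): CommandType.READ,
--     ("cluster-info",): CommandType.READ,
--     ("version",): CommandType.READ,
--     ("auth",): CommandType.READ,
-- }
--
-- def _classify_kubernetes(command: str) -> CommandType:
--     """Classify a kubectl command by longest-prefix lookup in a phrase table."""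
--     cmd = command.strip()
--     if not cmd.startswith("kubectl "):
--         return CommandType.READ if cmd == "kubectl" else CommandType.WRITE
--     tokens = [p.lower() for p in cmd[len("kubectl "):].split() if not p.startswith("-")]
--     return _RULES.get(tuple(tokens[:2]), _RULES.get(tuple(tokens[:1]), CommandType.WRITE))
-- ===== Notes on version B (the rewrite author's own statement) =====
-- stated objective: alternative
-- what changed: Replaces A's branch cascade over four subcommand sets plus a second stateful rollout rescan with found_rollout by a single data-driven phrase table (dict keyed by tuples of one or two tokens) consulted with a longest-prefix lookup on the first two non-flag tokens.
import Mathlib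
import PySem

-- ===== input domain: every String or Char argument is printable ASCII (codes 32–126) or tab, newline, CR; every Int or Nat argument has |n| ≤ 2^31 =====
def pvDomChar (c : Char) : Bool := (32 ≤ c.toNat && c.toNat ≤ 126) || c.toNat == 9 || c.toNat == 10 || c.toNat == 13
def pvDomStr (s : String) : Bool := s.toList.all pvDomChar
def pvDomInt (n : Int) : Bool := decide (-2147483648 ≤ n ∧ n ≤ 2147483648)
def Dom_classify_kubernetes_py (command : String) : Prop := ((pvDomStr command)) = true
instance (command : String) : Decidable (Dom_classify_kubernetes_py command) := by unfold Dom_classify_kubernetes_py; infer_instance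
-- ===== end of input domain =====

-- B replaces A's branch cascade and stateful rollout rescan by one data table:
-- a longest-prefix phrase dictionary looked up on the first two non-flag tokens (objective: simpler).

-- ===== PORT A =====
def pvReadSubs : List String :=
  ["get", "describe", "logs", "top", "explain", "api-resources", "api-versions",
   "cluster-info", "version", "auth"]
def pvDangerSubs : List String := ["delete", "drain", "cordon", "taint"]
def pvWriteSubs : List String :=
  ["apply", "create", "patch", "replace", "set", "scale", "autoscale", "rollout",
   "label", "annotate", "uncordon", "edit", "expose", "run", "cp", "exec"]
def pvBlockedSubs : List String := ["proxy"]

-- _k8s_get_subcommand: first non-flag token, lowercased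
def pvKGet : List String → Option String
  | [] => none
  | p :: rest =>
    if PySem.Str.startswith p "-" then pvKGet rest else some (PySem.Str.lower p)

-- A's rollout rescan with the found_rollout flag
def pvRolloutScan : Bool → List String → String
  | _, [] => "write"
  | found, p :: rest =>
    if PySem.Str.startswith p "-" then pvRolloutScan found rest
    else if found = false then
      if PySem.Str.lower p = "rollout" then pvRolloutScan true rest
      else pvRolloutScan false rest
    else
      let s := PySem.Str.lower p
      if s = "undo" ∨ s = "restart" then "dangerous"
      else if s = "status" ∨ s = "history" then "read"
      else "write"

def classify_kubernetes_py (command : String) : String :=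
  let cmd := PySem.Str.strip command
  if PySem.Str.startswith cmd "kubectl " then
    -- rest = cmd[len("kubectl "):]; written inline at its two uses
    match pvKGet (PySem.Str.split₀ (PySem.Str.slice cmd (some 8) none)) with
    | none => "write"
    | some subcommand =>
      if subcommand ∈ pvBlockedSubs then "blocked"
      else if subcommand ∈ pvDangerSubs then "dangerous"
      else if subcommand = "rollout" then pvRolloutScan false (PySem.Str.split₀ (PySem.Str.slice cmd (some 8) none))
      else if subcommand ∈ pvReadSubs then "read"
      else if subcommand ∈ pvWriteSubs then "write"
      else "write"
  else if cmd = "kubectl" then "read"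
  else "write"

-- ===== PORT B =====
-- _RULES: dict keyed by tuples of 1 or 2 strings; the mixed-arity tuple keys are modeled as List String
def pvRules : PySem.Dict (List String) String := PySem.Dict.ofList
  [(["proxy"], "blocked"),
   (["delete"], "dangerous"), (["drain"], "dangerous"),
   (["cordon"], "dangerous"), (["taint"], "dangerous"),
   (["rollout", "undo"], "dangerous"), (["rollout", "restart"], "dangerous"),
   (["rollout", "status"], "read"), (["rollout", "history"], "read"),
   (["rollout"], "write"),
   (["get"], "read"), (["describe"], "read"), (["logs"], "read"),
   (["top"], "read"), (["explain"], "read"), (["api-resources"], "read"),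
   (["api-versions"], "read"), (["cluster-info"], "read"),
   (["version"], "read"), (["auth"], "read")]

-- tokens = [p.lower() for p in ... .split() if not p.startswith("-")]
def pvTokens (ts : List String) : List String :=
  (ts.filter (fun p => !PySem.Str.startswith p "-")).map PySem.Str.lower

def classify_kubernetes_py_alt (command : String) : String :=
  let cmd := PySem.Str.strip command
  if !PySem.Str.startswith cmd "kubectl " then
    if cmd = "kubectl" then "read" else "write"
  else
    let tokens := pvTokens (PySem.Str.split₀ (PySem.Str.slice cmd (some 8) none))
    pvRules.getD (tokens.take 2) (pvRules.getD (tokens.take 1) "write")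

-- ===== PRECONDITION & SPEC =====
def Spec_classify_kubernetes_py (command : String) (out : String) : Prop := out = classify_kubernetes_py_alt command
instance (command : String) (out : String) : Decidable (Spec_classify_kubernetes_py command out) := by unfold Spec_classify_kubernetes_py; infer_instance

-- ===== CLAIM =====
def Claim_equal_classify_kubernetes_py : Prop := ∀ (command : String), Dom_classify_kubernetes_py command → Spec_classify_kubernetes_py command (classify_kubernetes_py command)

-- ===== LEMMAS AND PROOFS =====

lemma pvKGet_eq_head (ts : List String) : pvKGet ts = (pvTokens ts).head? := by
  induction ts with
  | nil => rfl
  | cons p rest ih =>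
    by_cases h : PySem.Chars.startswith p.toList ['-'] = true <;>
      simp [pvKGet, pvTokens, h, ih]

lemma pvRolloutScan_true (ts : List String) :
    pvRolloutScan true ts =
      (if (pvTokens ts).head? = some "undo" ∨ (pvTokens ts).head? = some "restart" then "dangerous"
       else if (pvTokens ts).head? = some "status" ∨ (pvTokens ts).head? = some "history" then "read"
       else "write") := by
  induction ts with
  | nil => rfl
  | cons p rest ih =>
    by_cases h : PySem.Chars.startswith p.toList ['-'] = true
    · simpa [pvRolloutScan, pvTokens, h] using ih
    · simp [pvRolloutScan, pvTokens, h]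

lemma pvRolloutScan_false (ts : List String) (h : pvKGet ts = some "rollout") :
    pvRolloutScan false ts =
      (if (pvTokens ts).tail.head? = some "undo" ∨ (pvTokens ts).tail.head? = some "restart" then "dangerous"
       else if (pvTokens ts).tail.head? = some "status" ∨ (pvTokens ts).tail.head? = some "history" then "read"
       else "write") := by
  induction ts with
  | nil => simp [pvKGet] at h
  | cons p rest ih =>
    by_cases hf : PySem.Chars.startswith p.toList ['-'] = true
    · rw [show pvKGet (p :: rest) = pvKGet rest from by simp [pvKGet, hf]] at h
      simpa [pvRolloutScan, hf, pvTokens] using ih h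
    · have hp : PySem.Str.lower p = "rollout" := by
        simp only [pvKGet] at h
        rw [if_neg (by simpa using hf)] at h
        exact Option.some.inj h
      simp [pvRolloutScan, hf, hp, pvTokens, pvRolloutScan_true]

lemma pv_core (ts : List String) :
    (match pvKGet ts with
     | none => "write"
     | some subcommand =>
       if subcommand ∈ pvBlockedSubs then "blocked"
       else if subcommand ∈ pvDangerSubs then "dangerous"
       else if subcommand = "rollout" then pvRolloutScan false ts
       else if subcommand ∈ pvReadSubs then "read"
       else if subcommand ∈ pvWriteSubs then "write"
       else "write") =
    pvRules.getD ((pvTokens ts).take 2) (pvRules.getD ((pvTokens ts).take 1) "write") := by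
  have hscan := pvRolloutScan_false ts
  rw [pvKGet_eq_head] at *
  rcases htk : pvTokens ts with _ | ⟨t0, rest⟩
  · simp [pvRules, PySem.Dict.ofList, PySem.Dict.update, PySem.Dict.getD_insert]
  · rw [htk] at hscan
    simp only [List.head?]
    by_cases h1 : t0 = "proxy"
    · subst h1
      rcases rest with _ | ⟨t1, r⟩ <;>
        simp [pvBlockedSubs, pvRules, PySem.Dict.ofList, PySem.Dict.update, PySem.Dict.getD_insert]
    · by_cases h2 : t0 ∈ pvDangerSubs
      · simp only [pvDangerSubs, List.mem_cons, List.not_mem_nil, or_false] at h2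
        rcases h2 with rfl | rfl | rfl | rfl <;>
          rcases rest with _ | ⟨t1, r⟩ <;>
            simp [pvBlockedSubs, pvDangerSubs, pvRules, PySem.Dict.ofList, PySem.Dict.update,
              PySem.Dict.getD_insert]
      · by_cases h3 : t0 = "rollout"
        · subst h3
          rw [hscan (by simp)]
          rcases rest with _ | ⟨t1, r⟩
          · simp [pvBlockedSubs, pvDangerSubs, pvRules, PySem.Dict.ofList, PySem.Dict.update,
              PySem.Dict.getD_insert]
          · by_cases hu : t1 = "undo"
            · subst hu; simp [pvBlockedSubs, pvDangerSubs, pvRules, PySem.Dict.ofList,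
                PySem.Dict.update, PySem.Dict.getD_insert]
            · by_cases hr : t1 = "restart"
              · subst hr; simp [pvBlockedSubs, pvDangerSubs, pvRules, PySem.Dict.ofList,
                  PySem.Dict.update, PySem.Dict.getD_insert]
              · by_cases hs : t1 = "status"
                · subst hs; simp [pvBlockedSubs, pvDangerSubs, pvRules, PySem.Dict.ofList,
                    PySem.Dict.update, PySem.Dict.getD_insert]
                · by_cases hh : t1 = "history"
                  · subst hh; simp [pvBlockedSubs, pvDangerSubs, pvRules, PySem.Dict.ofList,
                      PySem.Dict.update, PySem.Dict.getD_insert]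
                  · simp [pvBlockedSubs, pvDangerSubs, pvRules, PySem.Dict.ofList,
                      PySem.Dict.update, PySem.Dict.getD_insert, hu, hr, hs, hh]
        · by_cases h4 : t0 ∈ pvReadSubs
          · simp only [pvReadSubs, List.mem_cons, List.not_mem_nil, or_false] at h4
            rcases h4 with rfl | rfl | rfl | rfl | rfl | rfl | rfl | rfl | rfl | rfl <;>
              rcases rest with _ | ⟨t1, r⟩ <;>
                simp [pvBlockedSubs, pvDangerSubs, pvReadSubs, pvRules, PySem.Dict.ofList,
                  PySem.Dict.update, PySem.Dict.getD_insert]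
          · have h1' : t0 ≠ "proxy" := h1
            simp only [pvDangerSubs, List.mem_cons, List.not_mem_nil, or_false,
              not_or] at h2
            simp only [pvReadSubs, List.mem_cons, List.not_mem_nil, or_false,
              not_or] at h4
            obtain ⟨hd1, hd2, hd3, hd4⟩ := h2
            obtain ⟨hr1, hr2, hr3, hr4, hr5, hr6, hr7, hr8, hr9, hr10⟩ := h4
            rcases rest with _ | ⟨t1, r⟩ <;>
              simp [pvBlockedSubs, pvDangerSubs, pvReadSubs, pvRules, PySem.Dict.ofList,
                PySem.Dict.update, PySem.Dict.getD_insert, h1', h3,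
                hd1, hd2, hd3, hd4, hr1, hr2, hr3, hr4, hr5, hr6, hr7, hr8, hr9, hr10]

set_option maxHeartbeats 1000000 in
theorem pv_main (command : String) :
    classify_kubernetes_py command = classify_kubernetes_py_alt command := by
  simp only [classify_kubernetes_py, classify_kubernetes_py_alt]
  by_cases hk : PySem.Str.startswith (PySem.Str.strip command) "kubectl " = true
  · rw [if_pos hk, if_neg (by simpa using hk)]
    exact pv_core (PySem.Str.split₀ (PySem.Str.slice (PySem.Str.strip command) (some 8) none))
  · rw [if_neg hk,
        if_pos (show (!PySem.Str.startswith (PySem.Str.strip command) "kubectl ") = true from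
          by simpa using hk)]

-- ===== VERDICT =====
theorem classify_kubernetes_py_spec : Claim_equal_classify_kubernetes_py := by
  intro command _
  unfold Spec_classify_kubernetes_py
  exact pv_main command
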